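-- pv_equiv track=rewrite | github.com/khmarochos/vault-cluster | filter_plugins/full_secret_path.py | full_secret_path
-- ===== SOURCE A (Python) =====
-- def full_secret_path(extra_path, current_path):
--
--     extra_path_elements = extra_path.split('/') if extra_path else []
--
--     result = [''] + current_path.copy()
--
--     for index, extra_path_element in enumerate(extra_path_elements):
--         if extra_path_element == '':
--             if index == 0:
--                 result = []
--             elif index != len(extra_path_elements) - 1:
--                 continue
--         if extra_path_element != '.':
--             result.append(extra_path_element)
--
--     result = ['', ''] if result == [''] else result
--
--     return '/'.join(result)
-- ===== SOURCE B (Python) =====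
-- def full_secret_path(extra_path, current_path):
--     ep = extra_path or ''
--     tokens = [t for t in ep.split('/') if t not in ('', '.')] if ep else []
--     base = '' if ep.startswith('/') else '/'.join([''] + list(current_path))
--     s = base + ''.join('/' + t for t in tokens) + ('/' if ep.endswith('/') else '')
--     return s or '/'
-- ===== Notes on version B (the rewrite author's own statement) =====
-- stated objective: simpler
-- what changed: Replaces A's indexed result-list loop (enumerate with index==0 reset, last-index test, per-element append) by direct string arithmetic: one uniform filter dropping '' and '.' from the split, absolute/trailing cases decided by startswith('/')/endswith('/') string tests, and the answer built by concatenating '/'-prefixed tokens onto a base string, with no result list and no indices.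
import Mathlib
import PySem

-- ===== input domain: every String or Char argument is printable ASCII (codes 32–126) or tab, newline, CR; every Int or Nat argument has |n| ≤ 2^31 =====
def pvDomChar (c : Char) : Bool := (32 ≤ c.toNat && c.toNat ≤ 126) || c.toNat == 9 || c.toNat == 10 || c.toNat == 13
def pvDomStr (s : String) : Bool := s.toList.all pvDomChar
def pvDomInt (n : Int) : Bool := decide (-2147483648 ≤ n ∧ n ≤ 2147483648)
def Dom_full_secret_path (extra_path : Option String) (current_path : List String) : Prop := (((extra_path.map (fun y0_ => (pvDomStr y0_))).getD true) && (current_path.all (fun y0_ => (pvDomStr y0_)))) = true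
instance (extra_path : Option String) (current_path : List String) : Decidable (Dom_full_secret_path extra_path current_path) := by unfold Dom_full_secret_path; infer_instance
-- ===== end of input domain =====

-- B rebuilds the path by STRING arithmetic instead of A's indexed list loop: it filters
-- the split once (dropping '' and '.' uniformly), derives the absolute/trailing cases from
-- startswith/endswith string tests, and concatenates '/'-prefixed tokens directly into the
-- answer string — no result list, no enumerate indices. Objective: simpler. Neither
-- implementation mutates its arguments.

-- ===== PORT A =====

-- 'extra_path.split('/') if extra_path else []' (falsy = None or ""); the separator "/"
-- is non-empty, so split? is always 'some' and the .getD [] default is never taken.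
def fspElems (extra_path : Option String) : List String :=
  match extra_path with
  | some s => if s = "" then [] else (PySem.Str.split? s "/").getD []
  | none => []

-- A's 'for index, element in enumerate(elements)' loop as index recursion over the list;
-- n = len(extra_path_elements), i = index, res = result.
def fspLoopA (n : Nat) : Nat → List String → List String → List String
  | _, res, [] => res
  | i, res, e :: tl =>
    if e = "" ∧ i ≠ 0 ∧ i ≠ n - 1 then
      -- 'continue'
      fspLoopA n (i + 1) res tl
    else
      let res1 := if e = "" ∧ i = 0 then [] else res
      fspLoopA n (i + 1) (if e ≠ "." then res1 ++ [e] else res1) tl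

def full_secret_path (extra_path : Option String) (current_path : List String) : String :=
  let elems := fspElems extra_path
  let result := fspLoopA elems.length 0 ([""] ++ current_path) elems
  let result := if result = [""] then ["", ""] else result
  PySem.Str.join "/" result

-- ===== PORT B =====
def full_secret_path_alt (extra_path : Option String) (current_path : List String) : String :=
  -- ep = extra_path or ''
  let ep := extra_path.getD ""
  -- tokens = [t for t in ep.split('/') if t not in ('', '.')] if ep else []
  let tokens := if ep = "" then [] else (((PySem.Str.split? ep "/").getD []).filter (fun t => t != "" && t != "."))
  -- base = '' if ep.startswith('/') else '/'.join([''] + list(current_path))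
  let base := if PySem.Str.startswith ep "/" then "" else PySem.Str.join "/" ([""] ++ current_path)
  -- s = base + ''.join('/' + t for t in tokens) + ('/' if ep.endswith('/') else '')
  let s := base ++ PySem.Str.join "" (tokens.map (fun t => "/" ++ t)) ++ (if PySem.Str.endswith ep "/" then "/" else "")
  -- return s or '/'
  if s = "" then "/" else s

-- ===== PRECONDITION & SPEC =====
def Spec_full_secret_path (extra_path : Option String) (current_path : List String) (out : String) : Prop := out = full_secret_path_alt extra_path current_path
instance (extra_path : Option String) (current_path : List String) (out : String) : Decidable (Spec_full_secret_path extra_path current_path out) := by unfold Spec_full_secret_path; infer_instance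

-- ===== CLAIM (what is proved, stated in full; the proofs are below) =====
def Claim_equal_full_secret_path : Prop := ∀ (extra_path : Option String) (current_path : List String), Dom_full_secret_path extra_path current_path → Spec_full_secret_path extra_path current_path (full_secret_path extra_path current_path)

-- ===== LEMMAS AND PROOFS =====

-- ---- characterisation of PySem's splitOn at separator '/' by a simple structural recursion ----
def mySplit : List Char → List (List Char)
  | [] => [[]]
  | c :: rest => if c = '/' then [] :: mySplit rest else (c :: (mySplit rest).headD []) :: (mySplit rest).tail

lemma mySplit_ne_nil (cs : List Char) : mySplit cs ≠ [] := by
  cases cs with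
  | nil => simp [mySplit]
  | cons c rest => unfold mySplit; split_ifs <;> simp

lemma cons_headD_tail {α : Type} (l : List α) (d : α) (h : l ≠ []) : l.head?.getD d :: l.tail = l := by
  cases l with
  | nil => exact absurd rfl h
  | cons a t => simp

lemma splitOn_go_eq : ∀ (fuel : Nat) (l cur : List Char) (acc : List (List Char)),
    l.length ≤ fuel →
    PySem.Chars.splitOn.go ['/'] fuel l cur acc
      = acc.reverse ++ (cur.reverse ++ (mySplit l).headD []) :: (mySplit l).tail := by
  intro fuel
  induction fuel with
  | zero =>
    intro l cur acc hl
    have : l = [] := by cases l <;> simp_all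
    subst this
    simp [PySem.Chars.splitOn.go, mySplit]
  | succ f ih =>
    intro l cur acc hl
    cases l with
    | nil => simp [PySem.Chars.splitOn.go, mySplit]
    | cons c rest =>
      by_cases hc : c = '/'
      · subst hc
        rw [PySem.Chars.splitOn.go]
        have hpre : List.isPrefixOf ['/'] ('/' :: rest) = true := by
          simp [List.isPrefixOf]
        rw [if_pos hpre]
        simp only [List.length_cons, List.length_nil, List.drop_succ_cons, List.drop_zero]
        rw [ih rest [] ((List.reverse cur) :: acc) (by simpa using hl)]
        rw [show mySplit ('/' :: rest) = [] :: mySplit rest from by simp [mySplit]]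
        simp [cons_headD_tail _ _ (mySplit_ne_nil rest)]
      · rw [PySem.Chars.splitOn.go]
        have hpre : List.isPrefixOf ['/'] (c :: rest) = false := by
          simp [List.isPrefixOf]
          intro h; exact absurd h.symm hc
        rw [if_neg (by simp [hpre])]
        rw [ih rest (c :: cur) acc (by simpa using hl)]
        rw [show mySplit (c :: rest) = (c :: (mySplit rest).headD []) :: (mySplit rest).tail from by
          simp [mySplit, hc]]
        simp

lemma splitOn_eq_mySplit (cs : List Char) : PySem.Chars.splitOn cs ['/'] = mySplit cs := by
  unfold PySem.Chars.splitOn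
  rw [splitOn_go_eq (cs.length + 1) cs [] [] (by omega)]
  simp [cons_headD_tail _ _ (mySplit_ne_nil cs)]

lemma mySplit_ne_singleton_nil (cs : List Char) (h : cs ≠ []) : mySplit cs ≠ [[]] := by
  cases cs with
  | nil => exact absurd rfl h
  | cons c rest =>
    unfold mySplit
    split_ifs with hc
    · intro he
      exact mySplit_ne_nil rest (by simpa using he)
    · simp

lemma mySplit_head_empty (c : Char) (rest : List Char) :
    ((mySplit (c :: rest)).head? = some []) ↔ c = '/' := by
  unfold mySplit
  split_ifs with hc <;> simp [hc]

lemma mySplit_length_ge_two (cs : List Char) (h : '/' ∈ cs) : 2 ≤ (mySplit cs).length := by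
  induction cs with
  | nil => simp at h
  | cons c rest ih =>
    by_cases hc : c = '/'
    · subst hc
      have := mySplit_ne_nil rest
      have : 1 ≤ (mySplit rest).length := by
        cases hr : mySplit rest with
        | nil => exact absurd hr (mySplit_ne_nil rest)
        | cons a t => simp
      simp [mySplit]
      omega
    · have hr : '/' ∈ rest := by
        rcases List.mem_cons.mp h with h1 | h1
        · exact absurd h1.symm hc
        · exact h1
      have hlen : (mySplit (c :: rest)).length = (mySplit rest).length := by
        rw [show mySplit (c :: rest) = (c :: (mySplit rest).headD []) :: (mySplit rest).tail from by
          simp [mySplit, hc]]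
        simp [List.length_tail]
        have : 1 ≤ (mySplit rest).length := by
          cases hx : mySplit rest with
          | nil => exact absurd hx (mySplit_ne_nil rest)
          | cons a t => simp
        omega
      rw [hlen]; exact ih hr

lemma mySplit_last_empty : ∀ (cs : List Char), cs ≠ [] →
    (((mySplit cs).getLast? = some []) ↔ cs.getLast? = some '/') := by
  intro cs
  induction cs with
  | nil => intro h; exact absurd rfl h
  | cons c rest ih =>
    intro _
    cases rest with
    | nil =>
      unfold mySplit
      split_ifs with hc <;> simp [hc, mySplit]
    | cons d rs =>
      have hrest : (d :: rs) ≠ [] := by simp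
      have hlastc : (c :: d :: rs).getLast? = (d :: rs).getLast? := List.getLast?_cons_cons
      rw [hlastc]
      by_cases hc : c = '/'
      · rw [show mySplit (c :: d :: rs) = [] :: mySplit (d :: rs) from by simp [mySplit, hc]]
        obtain ⟨h, t, hht⟩ : ∃ h t, mySplit (d :: rs) = h :: t := by
          cases hx : mySplit (d :: rs) with
          | nil => exact absurd hx (mySplit_ne_nil _)
          | cons a t => exact ⟨a, t, rfl⟩
        rw [hht, List.getLast?_cons_cons, ← hht]
        exact ih hrest
      · obtain ⟨h, t, hht⟩ : ∃ h t, mySplit (d :: rs) = h :: t := by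
          cases hx : mySplit (d :: rs) with
          | nil => exact absurd hx (mySplit_ne_nil _)
          | cons a t => exact ⟨a, t, rfl⟩
        rw [show mySplit (c :: d :: rs) = (c :: (mySplit (d :: rs)).headD []) :: (mySplit (d :: rs)).tail from by
          simp [mySplit, hc]]
        rw [hht]
        cases t with
        | nil =>
          simp only [List.headD_cons, List.tail_cons, List.getLast?_singleton]
          constructor
          · intro hx; simp at hx
          · intro hx
            have hmem : '/' ∈ (d :: rs) := by
              rcases List.getLast?_eq_some_iff.mp hx with ⟨ys, hys⟩
              rw [hys]; simp
            have := mySplit_length_ge_two (d :: rs) hmem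
            rw [hht] at this; simp at this
        | cons e ts =>
          simp only [List.headD_cons, List.tail_cons, List.getLast?_cons_cons]
          rw [← List.getLast?_cons_cons (a := h), ← hht]
          exact ih hrest

-- ---- join at separator '/' ----
lemma intersperse_cc {α : Type} (sep a b : List α) (l : List (List α)) :
    List.intersperse sep (a :: b :: l) = a :: sep :: List.intersperse sep (b :: l) := by
  simp

lemma cjoin_cons (a : List Char) (l : List (List Char)) :
    PySem.Chars.join ['/'] (a :: l) = a ++ (l.map (fun t => '/' :: t)).flatten := by
  induction l generalizing a with
  | nil => simp [PySem.Chars.join, List.intercalate]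
  | cons b t ih =>
    show List.intercalate ['/'] (a :: b :: t) = _
    rw [List.intercalate, intersperse_cc, List.flatten_cons, List.flatten_cons]
    have := ih b
    rw [PySem.Chars.join, List.intercalate] at this
    rw [this]
    simp

lemma cjoin_nil_sep (l : List (List Char)) : PySem.Chars.join [] l = l.flatten := by
  induction l with
  | nil => simp [PySem.Chars.join, List.intercalate]
  | cons a t ih =>
    cases t with
    | nil => simp [PySem.Chars.join, List.intercalate]
    | cons b ts =>
      show List.intercalate [] (a :: b :: ts) = _
      rw [List.intercalate, intersperse_cc, List.flatten_cons, List.flatten_cons]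
      rw [PySem.Chars.join, List.intercalate] at ih
      rw [ih]
      simp

lemma cjoin_append (a : List Char) (l1 l2 : List (List Char)) :
    PySem.Chars.join ['/'] ((a :: l1) ++ l2)
      = PySem.Chars.join ['/'] (a :: l1) ++ (l2.map (fun t => '/' :: t)).flatten := by
  rw [List.cons_append, cjoin_cons, cjoin_cons]
  simp

lemma cjoin_eq_nil_iff (a : List Char) (l : List (List Char)) :
    PySem.Chars.join ['/'] (a :: l) = [] ↔ a = [] ∧ l = [] := by
  rw [cjoin_cons]
  simp [List.flatten_eq_nil_iff]
  intro _
  constructor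
  · intro h
    cases l with
    | nil => rfl
    | cons x t => exact absurd (h x (by simp)) (by simp)
  · intro h; subst h; simp

-- ---- A's loop characterised by one filter plus head/last tests ----
lemma fspLoopA_nil (n i : Nat) (res : List String) : fspLoopA n i res [] = res := rfl

lemma fspLoopA_cons_skip {n i : Nat} {res tl : List String} {e : String}
    (h : e = "" ∧ i ≠ 0 ∧ i ≠ n - 1) :
    fspLoopA n i res (e :: tl) = fspLoopA n (i + 1) res tl := by
  rw [fspLoopA, if_pos h]

lemma fspLoopA_cons_go {n i : Nat} {res tl : List String} {e : String}
    (h : ¬ (e = "" ∧ i ≠ 0 ∧ i ≠ n - 1)) :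
    fspLoopA n i res (e :: tl) =
      fspLoopA n (i + 1)
        (if e ≠ "." then (if e = "" ∧ i = 0 then [] else res) ++ [e]
         else (if e = "" ∧ i = 0 then [] else res)) tl := by
  rw [fspLoopA, if_neg h]

def fspBodyB (result body : List String) : List String :=
  if body ≠ [] then
    (result ++ body.dropLast.filter (fun e => e != "" && e != ".")) ++
      (if body.getLastD "" ≠ "." then [body.getLastD ""] else [])
  else result

-- the loop from index ≥ 1 onwards
lemma fspLoopA_tail (tl : List String) : ∀ (n j : Nat) (res : List String),
    1 ≤ j → j + tl.length = n → fspLoopA n j res tl = fspBodyB res tl := by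
  induction tl with
  | nil => intro n j res _ _; simp [fspLoopA_nil, fspBodyB]
  | cons e tl ih =>
    intro n j res hj hn
    cases tl with
    | nil =>
      have hlast : j = n - 1 := by simp at hn; omega
      rw [fspLoopA_cons_go (by tauto), fspLoopA_nil]
      by_cases hd : e = "." <;>
        simp [fspBodyB, hd, show ¬ (e = "" ∧ j = 0) from by rintro ⟨_, h0⟩; omega]
    | cons f tl2 =>
      have hne : j ≠ n - 1 := by simp at hn; omega
      have hrec : (j + 1) + (f :: tl2).length = n := by simp at hn ⊢; omega
      have hj0 : j ≠ 0 := by omega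
      by_cases he : e = ""
      · subst he
        rw [fspLoopA_cons_skip ⟨rfl, hj0, hne⟩, ih n (j + 1) res (by omega) hrec]
        simp [fspBodyB, List.dropLast_cons₂]
      · rw [fspLoopA_cons_go (by tauto), ih n (j + 1) _ (by omega) hrec]
        by_cases hd : e = "." <;>
          simp [fspBodyB, List.dropLast_cons₂, he, hd, hj0, List.append_assoc,
            List.getLastD_eq_getLast?]

-- fspBodyB's dropLast/last asymmetry collapses to one filter plus a trailing-empty test
lemma fspBodyB_eq (res body : List String) (h : body ≠ []) :
    fspBodyB res body
      = res ++ body.filter (fun t => t != "" && t != ".")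
          ++ (if body.getLast? = some "" then [""] else []) := by
  rcases List.eq_nil_or_concat body with h0 | ⟨ys, x, hyx⟩
  · exact absurd h0 h
  · subst hyx
    simp only [List.concat_eq_append]
    by_cases hx0 : x = ""
    · subst hx0
      simp [fspBodyB, List.filter_append, List.getLastD_concat, List.getLast?_concat]
    · by_cases hxd : x = "."
      · subst hxd
        simp [fspBodyB, List.filter_append, List.getLastD_concat, List.getLast?_concat]
      · simp [fspBodyB, List.filter_append, List.getLastD_concat, List.getLast?_concat, hx0, hxd,
          List.append_assoc]

-- A's whole loop (from index 0), for any element list except the impossible [""]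
lemma loopA_char (elems cur : List String) (h : elems ≠ [""]) :
    fspLoopA elems.length 0 ([""] ++ cur) elems
      = (if elems.head? = some "" then [""] else [""] ++ cur)
          ++ elems.filter (fun t => t != "" && t != ".")
          ++ (if elems.getLast? = some "" then [""] else []) := by
  cases elems with
  | nil => simp [fspLoopA_nil]
  | cons e0 rest =>
    have hlen : 1 + rest.length = (e0 :: rest).length := by simp; omega
    by_cases he : e0 = ""
    · subst he
      have hrest : rest ≠ [] := by intro hr; subst hr; exact h rfl
      rw [fspLoopA_cons_go (by simp), fspLoopA_tail rest _ 1 _ (by omega) hlen]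
      rw [fspBodyB_eq _ _ hrest]
      obtain ⟨f, tl2, hf⟩ : ∃ f tl2, rest = f :: tl2 := by
        cases rest with
        | nil => exact absurd rfl hrest
        | cons f tl2 => exact ⟨f, tl2, rfl⟩
      subst hf
      simp [List.getLast?_cons_cons]
    · rw [fspLoopA_cons_go (by tauto)]
      cases rest with
      | nil =>
        rw [fspLoopA_nil]
        by_cases hd : e0 = "." <;> simp [hd, he]
      | cons f tl2 =>
        rw [fspLoopA_tail (f :: tl2) _ 1 _ (by omega) hlen,
          fspBodyB_eq _ _ (by simp)]
        by_cases hd : e0 = "." <;>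
          simp [he, hd, List.getLast?_cons_cons, List.append_assoc]

-- ---- string-level bridges ----
lemma map_ofList_eq_singleton_empty (l : List (List Char)) :
    List.map String.ofList l = [""] ↔ l = [[]] := by
  cases l with
  | nil => simp
  | cons a t =>
    simp only [List.map_cons, List.cons.injEq, List.map_eq_nil_iff]
    constructor
    · rintro ⟨ha, ht⟩
      refine ⟨?_, ht⟩
      have := congrArg String.toList ha
      simpa [String.toList_ofList] using this
    · rintro ⟨ha, ht⟩; subst ha; exact ⟨rfl, ht⟩

lemma elems_eq_map (ep : String) (h : ep ≠ "") :
    (PySem.Str.split? ep "/").getD [] = List.map String.ofList (mySplit ep.toList) := by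
  have h1 : PySem.Chars.split? ep.toList "/".toList = some (PySem.Chars.splitOn ep.toList ['/']) := by
    simp [PySem.Chars.split?]
  unfold PySem.Str.split?
  rw [h1]
  simp [splitOn_eq_mySplit]

lemma singleton_prefix_iff (cs : List Char) : ['/'] <+: cs ↔ cs.head? = some '/' := by
  cases cs with
  | nil => simp
  | cons c t => simp [List.cons_prefix_cons, eq_comm]

lemma singleton_suffix_iff (cs : List Char) : ['/'] <:+ cs ↔ cs.getLast? = some '/' := by
  rw [List.getLast?_eq_some_iff]
  constructor
  · rintro ⟨t, ht⟩; exact ⟨t, ht.symm⟩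
  · rintro ⟨t, ht⟩; exact ⟨t, ht.symm⟩

lemma head?_map_ofList_empty (l : List (List Char)) :
    ((List.map String.ofList l).head? = some "") ↔ l.head? = some [] := by
  cases l with
  | nil => simp
  | cons a t =>
    simp only [List.map_cons, List.head?_cons, Option.some.injEq]
    constructor
    · intro ha
      have := congrArg String.toList ha
      simpa [String.toList_ofList] using this
    · intro ha; subst ha; rfl

lemma getLast?_map_ofList_empty (l : List (List Char)) :
    ((List.map String.ofList l).getLast? = some "") ↔ l.getLast? = some [] := by
  rw [List.getLast?_map]
  cases hl : l.getLast? with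
  | none => simp
  | some a =>
    simp only [Option.map_some, Option.some.injEq]
    constructor
    · intro ha
      have := congrArg String.toList ha
      simpa [String.toList_ofList] using this
    · intro ha; subst ha; rfl

-- join "/" L as a string for nonempty L, with the [''] normalisation on both shapes
lemma join_eq_empty_iff (a : String) (l : List String) :
    PySem.Str.join "/" (a :: l) = "" ↔ a :: l = [""] := by
  rw [← String.toList_inj, PySem.Str.toList_join]
  have : ("" : String).toList = [] := by simp
  rw [this]
  show PySem.Chars.join ['/'] (List.map String.toList (a :: l)) = [] ↔ _
  rw [List.map_cons, cjoin_eq_nil_iff]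
  simp [String.toList_eq_nil_iff]

lemma join_two_empty : PySem.Str.join "/" ["", ""] = "/" := by
  rw [← String.toList_inj, PySem.Str.toList_join]
  simp [cjoin_cons]

-- normalisation + join agree once the raw lists agree
lemma finish_eq (a : String) (r : List String) :
    PySem.Str.join "/" (if a :: r = [""] then ["", ""] else a :: r) =
      (if PySem.Str.join "/" (a :: r) = "" then "/" else PySem.Str.join "/" (a :: r)) := by
  by_cases h : a :: r = [""]
  · rw [if_pos h, if_pos ((join_eq_empty_iff a r).mpr h), join_two_empty]
  · rw [if_neg h, if_neg (fun hc => h ((join_eq_empty_iff a r).mp hc))]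

lemma slash_toList : ("/" : String).toList = ['/'] := by rfl

lemma empty_toList : ("" : String).toList = [] := by rfl

lemma join_concat3 (a : String) (l1 l2 : List String) (b : Bool) :
    PySem.Str.join "/" ((a :: l1) ++ l2 ++ (if b then [""] else []))
      = PySem.Str.join "/" (a :: l1) ++ PySem.Str.join "" (l2.map (fun t => "/" ++ t))
          ++ (if b then "/" else "") := by
  rw [← String.toList_inj]
  rw [PySem.Str.toList_join, String.toList_append, String.toList_append,
    PySem.Str.toList_join, PySem.Str.toList_join, slash_toList, empty_toList]
  have hmap : List.map String.toList (List.map (fun t => "/" ++ t) l2)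
      = List.map (fun t => '/' :: t) (List.map String.toList l2) := by
    rw [List.map_map, List.map_map]
    apply List.map_congr_left
    intro t _
    show ("/" ++ t).toList = '/' :: t.toList
    rw [String.toList_append, slash_toList]
    rfl
  rw [hmap, cjoin_nil_sep]
  cases b with
  | false =>
    rw [show List.map String.toList ((a :: l1) ++ l2 ++ (if (false : Bool) then [""] else []))
        = (a.toList :: List.map String.toList l1) ++ List.map String.toList l2 from by simp]
    rw [cjoin_append, List.map_cons]
    simp [empty_toList]
  | true =>
    rw [show List.map String.toList ((a :: l1) ++ l2 ++ (if (true : Bool) then [""] else []))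
        = (a.toList :: List.map String.toList l1) ++ (List.map String.toList l2 ++ [[]]) from by simp]
    rw [cjoin_append, List.map_cons]
    simp [slash_toList, List.map_append, List.flatten_append]

-- one assembly lemma: A's normalised join of base ++ tokens ++ trail equals B's
-- concatenated string, for any absolute/trailing conditions
lemma assemble (cur toks : List String) (pabs ptr : Prop) [Decidable pabs] [Decidable ptr] :
    PySem.Str.join "/"
        (if ((if pabs then [""] else [""] ++ cur) ++ toks ++ (if ptr then [""] else [])) = [""]
         then ["", ""]
         else ((if pabs then [""] else [""] ++ cur) ++ toks ++ (if ptr then [""] else [])))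
      = (if ((if pabs then "" else PySem.Str.join "/" ([""] ++ cur))
              ++ PySem.Str.join "" (toks.map (fun t => "/" ++ t))
              ++ (if ptr then "/" else "")) = ""
         then "/"
         else ((if pabs then "" else PySem.Str.join "/" ([""] ++ cur))
              ++ PySem.Str.join "" (toks.map (fun t => "/" ++ t))
              ++ (if ptr then "/" else ""))) := by
  have hcc : ∀ (a : String) (l1 : List String),
      PySem.Str.join "/" ((a :: l1) ++ toks ++ (if ptr then [""] else []))
        = PySem.Str.join "/" (a :: l1) ++ PySem.Str.join "" (toks.map (fun t => "/" ++ t))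
            ++ (if ptr then "/" else "") := by
    intro a l1
    by_cases h : ptr
    · simpa [if_pos h] using join_concat3 a l1 toks true
    · simpa [if_neg h] using join_concat3 a l1 toks false
  simp only [List.singleton_append]
  by_cases hp : pabs
  · simp only [if_pos hp]
    rw [show ("" :: ([] : List String)) ++ toks ++ (if ptr then [""] else [])
        = "" :: (([] : List String) ++ toks ++ (if ptr then [""] else [])) from by simp]
    rw [finish_eq "" (([] : List String) ++ toks ++ (if ptr then [""] else []))]
    rw [show ("" :: (([] : List String) ++ toks ++ (if ptr then [""] else [])))
        = ("" :: ([] : List String)) ++ toks ++ (if ptr then [""] else []) from by simp]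
    rw [hcc "" []]
    rw [show PySem.Str.join "/" ("" :: ([] : List String)) = "" from rfl]
  · simp only [if_neg hp]
    rw [show ("" :: cur) ++ toks ++ (if ptr then [""] else [])
        = "" :: (cur ++ toks ++ (if ptr then [""] else [])) from by simp]
    rw [finish_eq "" (cur ++ toks ++ (if ptr then [""] else []))]
    rw [show ("" :: (cur ++ toks ++ (if ptr then [""] else [])))
        = ("" :: cur) ++ toks ++ (if ptr then [""] else []) from by simp]
    rw [hcc "" cur]

-- ===== VERDICT (by name: the statement is the Claim_ definition above) =====
theorem full_secret_path_spec : Claim_equal_full_secret_path := by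
  intro extra_path current_path _
  unfold Spec_full_secret_path full_secret_path full_secret_path_alt
  by_cases hep : extra_path.getD "" = ""
  · -- extra_path is falsy: None or ""
    have helems : fspElems extra_path = [] := by
      cases extra_path with
      | none => rfl
      | some s => simp at hep; simp [fspElems, hep]
    rw [helems]
    simp only [hep, if_pos rfl, List.length_nil, fspLoopA_nil, List.map_nil,
      show PySem.Str.startswith "" "/" = false from by decide,
      show PySem.Str.endswith "" "/" = false from by decide,
      Bool.false_eq_true, if_false, if_true,
      show PySem.Str.join "" ([] : List String) = "" from rfl,
      String.append_empty, List.singleton_append]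
    exact finish_eq "" current_path
  · -- extra_path = some ep with ep ≠ ""
    obtain ⟨ep, hsome⟩ : ∃ ep, extra_path = some ep := by
      cases extra_path with
      | none => exact absurd rfl hep
      | some s => exact ⟨s, rfl⟩
    subst hsome
    simp only [Option.getD_some] at hep ⊢
    have helems : fspElems (some ep) = List.map String.ofList (mySplit ep.toList) := by
      simp [fspElems, hep, elems_eq_map ep hep]
    have hcs : ep.toList ≠ [] := fun h => hep (String.toList_eq_nil_iff.mp h)
    -- the split of a nonempty string is never [""]
    have hne1 : fspElems (some ep) ≠ [""] := by
      rw [helems, Ne, map_ofList_eq_singleton_empty]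
      exact mySplit_ne_singleton_nil _ hcs
    have hsplit : (PySem.Str.split? ep "/").getD [] = fspElems (some ep) := by
      simp [fspElems, hep]
    -- bridge the two head tests
    have hstart : (PySem.Str.startswith ep "/" = true) ↔ (fspElems (some ep)).head? = some "" := by
      obtain ⟨c, rest, hcons⟩ : ∃ c rest, ep.toList = c :: rest := by
        cases h : ep.toList with
        | nil => exact absurd h hcs
        | cons c rest => exact ⟨c, rest, rfl⟩
      rw [PySem.Str.startswith_eq, slash_toList, PySem.Chars.startswith_iff,
        singleton_prefix_iff, helems, head?_map_ofList_empty, hcons, List.head?_cons,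
        Option.some_inj]
      rw [show mySplit (c :: rest) = mySplit ep.toList from by rw [hcons], hcons]
      exact (mySplit_head_empty c rest).symm
    have hend : (PySem.Str.endswith ep "/" = true) ↔ (fspElems (some ep)).getLast? = some "" := by
      rw [PySem.Str.endswith_eq, slash_toList, PySem.Chars.endswith_iff,
        singleton_suffix_iff, helems, getLast?_map_ofList_empty]
      exact (mySplit_last_empty ep.toList hcs).symm
    rw [if_neg hep, hsplit, loopA_char _ current_path hne1]
    simp only [propext hstart, propext hend]
    exact assemble current_path ((fspElems (some ep)).filter (fun t => t != "" && t != "."))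
      ((fspElems (some ep)).head? = some "") ((fspElems (some ep)).getLast? = some "")
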